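-- pv_equiv track=rewrite | github.com/bradbeattie/python-vote-core | voting_system.py | __break_ties_complex__
-- ===== SOURCE A (Python) =====
-- def __break_ties_complex__(tied_objects, tie_breaker):
--     max_columns = len(list(tied_objects)[0])
--     column = 0
--     while len(tied_objects) > 1 and column < max_columns:
--         min_index = min(tie_breaker.index(list(object)[column]) for object in tied_objects)
--         tied_objects = set([object for object in tied_objects if object[column] == tie_breaker[min_index]])
--         column += 1
--     return list(tied_objects)[0]
-- ===== SOURCE B (Python) =====
-- def __break_ties_complex__(tied_objects, tie_breaker):
--     objects = list(tied_objects)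
--     max_columns = len(objects[0])
--     if len(objects) == 1:
--         return objects[0]
--     return min(objects, key=lambda o: [tie_breaker.index(o[c]) for c in range(max_columns)])
-- ===== Notes on version B (the rewrite author's own statement) =====
-- stated objective: simpler
-- what changed: Replaces A's column-by-column filtering of shrinking survivor sets with a single min over the candidates keyed by their precomputed lexicographic tie-breaker-rank list (a lone candidate is returned as-is, no ranking needed).
-- outside the precondition, e.g. on __break_ties_complex__({(2, 3), (1, 5)}, [1, 2, 3]): A returns (1, 5), B raises ValueError; on __break_ties_complex__({(2, 3), (1,)}, [1, 2]): A returns (1,), B raises ValueError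
import Mathlib
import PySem

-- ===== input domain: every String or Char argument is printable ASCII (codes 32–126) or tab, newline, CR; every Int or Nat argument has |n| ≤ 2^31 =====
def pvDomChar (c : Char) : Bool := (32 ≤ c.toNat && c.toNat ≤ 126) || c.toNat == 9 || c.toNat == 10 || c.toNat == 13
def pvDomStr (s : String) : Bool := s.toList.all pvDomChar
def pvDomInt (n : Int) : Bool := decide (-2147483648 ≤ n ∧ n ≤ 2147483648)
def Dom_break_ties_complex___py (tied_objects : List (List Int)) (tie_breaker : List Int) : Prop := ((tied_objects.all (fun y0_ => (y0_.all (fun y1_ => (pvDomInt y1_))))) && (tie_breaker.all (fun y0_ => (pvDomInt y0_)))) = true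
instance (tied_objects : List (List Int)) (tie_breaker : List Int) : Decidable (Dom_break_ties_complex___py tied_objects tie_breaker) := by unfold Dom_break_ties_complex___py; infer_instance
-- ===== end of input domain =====

-- B replaces A's column-by-column filtering of shrinking survivor sets by one pass: min with a
-- precomputed lexicographic tie-breaker-rank key (objective: simpler). Equivalence is about the
-- return value; under Pre_ the result does not depend on the (unobservable) set iteration order.

-- ===== PORT A =====
-- object[column] (IndexError → none; default unreachable under Pre_)
def pvCell (o : List Int) (c : Nat) : Int := (PySem.List.pyGet? o (c : Int)).getD 0
-- tie_breaker.index(x) (ValueError → none; default unreachable under Pre_)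
def pvRank (tb : List Int) (x : Int) : Nat := (PySem.List.index? tb x).getD 0

-- one iteration of A's while-body: min_index, then filter, then set(...)
def pvStep (tb : List Int) (c : Nat) (objs : List (List Int)) : List (List Int) :=
  let mi := (PySem.List.min? (objs.map (fun o => pvRank tb (pvCell o c))) (fun r => r)).getD 0
  let v := (PySem.List.pyGet? tb (mi : Int)).getD 0
  PySem.Set.ofList (objs.filter (fun o => pvCell o c == v))

def pvLoop (tb : List Int) (maxc : Nat) (c : Nat) (objs : List (List Int)) : List (List Int) :=
  if h : objs.length > 1 ∧ c < maxc then
    pvLoop tb maxc (c + 1) (pvStep tb c objs)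
  else objs
termination_by maxc - c
decreasing_by omega

def break_ties_complex___py (tied_objects : List (List Int)) (tie_breaker : List Int) : List Int :=
  let maxc := ((PySem.List.pyGet? tied_objects 0).getD []).length
  (PySem.List.pyGet? (pvLoop tie_breaker maxc 0 tied_objects) 0).getD []

-- ===== PORT B =====
-- key(o) = [tie_breaker.index(o[c]) for c in range(max_columns)]
def pvKey (tb : List Int) (maxc : Nat) (o : List Int) : List Nat :=
  (List.range maxc).map (fun c => pvRank tb (pvCell o c))

def break_ties_complex___py_alt (tied_objects : List (List Int)) (tie_breaker : List Int) : List Int :=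
  let maxc := ((PySem.List.pyGet? tied_objects 0).getD []).length
  if tied_objects.length = 1 then (PySem.List.pyGet? tied_objects 0).getD []
  else (PySem.List.min? tied_objects (pvKey tie_breaker maxc)).getD []

-- ===== PRECONDITION & SPEC =====
-- Pre_ excludes multi-row inputs whose rows have unequal lengths or contain a value absent
-- from tie_breaker: there A's result can hinge on the accidental set iteration order, or on
-- which cells its early-exiting scan happens to examine (returning a value or raising ValueError).
def Pre_break_ties_complex___py (tied_objects : List (List Int)) (tie_breaker : List Int) : Prop :=
  tied_objects ≠ [] ∧
  (tied_objects.length = 1 ∨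
    ((∀ o ∈ tied_objects, o.length = (tied_objects.headD []).length) ∧
     (∀ o ∈ tied_objects, ∀ x ∈ o, x ∈ tie_breaker)))
instance (tied_objects : List (List Int)) (tie_breaker : List Int) : Decidable (Pre_break_ties_complex___py tied_objects tie_breaker) := by unfold Pre_break_ties_complex___py; infer_instance

def pvWitness_break_ties_complex___py : List (List Int) × List Int := ([[1, 2], [2, 1]], [2, 1])

def Spec_break_ties_complex___py (tied_objects : List (List Int)) (tie_breaker : List Int) (out : List Int) : Prop := out = break_ties_complex___py_alt tied_objects tie_breaker
instance (tied_objects : List (List Int)) (tie_breaker : List Int) (out : List Int) : Decidable (Spec_break_ties_complex___py tied_objects tie_breaker out) := by unfold Spec_break_ties_complex___py; infer_instance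

-- ===== CLAIM (what is proved, stated in full; the proofs are below) =====
def Claim_equal_break_ties_complex___py : Prop := ∀ (tied_objects : List (List Int)) (tie_breaker : List Int), Dom_break_ties_complex___py tied_objects tie_breaker → Pre_break_ties_complex___py tied_objects tie_breaker → Spec_break_ties_complex___py tied_objects tie_breaker (break_ties_complex___py tied_objects tie_breaker)

-- ===== LEMMAS AND PROOFS =====

-- prefix of the key: first c columns
def pvKp (tb : List Int) (c : Nat) (o : List Int) : List Nat :=
  (List.range c).map (fun i => pvRank tb (pvCell o i))

lemma pvKp_succ (tb : List Int) (c : Nat) (o : List Int) :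
    pvKp tb (c + 1) o = pvKp tb c o ++ [pvRank tb (pvCell o c)] := by
  simp [pvKp, List.range_succ]

lemma pvKey_eq_kp (tb : List Int) (maxc : Nat) (o : List Int) :
    pvKey tb maxc o = pvKp tb maxc o := rfl

-- key decomposes at any scanned column
lemma pvKp_decomp (tb : List Int) (o : List Int) {c maxc : Nat} (h : c < maxc) :
    ∃ rest, pvKp tb maxc o = pvKp tb c o ++ pvRank tb (pvCell o c) :: rest := by
  obtain ⟨k, rfl⟩ : ∃ k, maxc = (c + 1) + k := ⟨maxc - (c + 1), by omega⟩
  refine ⟨(List.range k).map (fun i => pvRank tb (pvCell o (c + 1 + i))), ?_⟩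
  unfold pvKp
  rw [List.range_add, List.map_append, List.map_map, List.range_succ, List.map_append]
  simp [Function.comp]

-- lexicographic order on List Nat: equal prefix, smaller head ⇒ smaller list
lemma pvLex_append (p : List Nat) {x y : Nat} (u v : List Nat) (h : x < y) :
    p ++ x :: u < p ++ y :: v := by
  show List.Lex (· < ·) _ _
  induction p with
  | nil => exact List.Lex.rel h
  | cons a p ih => exact List.Lex.cons ih

-- the default LT on List Nat is the lexicographic linear order (same instance data)
lemma pvMin?_ord (R : List (List Int)) (key : List Int → List Nat) :
    PySem.List.min? R key
      = @PySem.List.min? _ _ List.instLinearOrder.toLT LinearOrder.toDecidableLT R key := by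
  congr 1

lemma pvRank_inj {tb : List Int} {x y : Int} (hx : x ∈ tb) (hy : y ∈ tb)
    (h : pvRank tb x = pvRank tb y) : x = y := by
  cases hix : PySem.List.index? tb x with
  | none => exact absurd hx ((PySem.List.index?_eq_none_iff _ _).mp hix)
  | some ix =>
    cases hiy : PySem.List.index? tb y with
    | none => exact absurd hy ((PySem.List.index?_eq_none_iff _ _).mp hiy)
    | some iy =>
      obtain ⟨hkx, hgx, -⟩ := PySem.List.getElem_of_index?_eq_some hix
      obtain ⟨hky, hgy, -⟩ := PySem.List.getElem_of_index?_eq_some hiy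
      simp only [pvRank, hix, hiy, Option.getD_some] at h
      subst h
      rw [← hgx, ← hgy]

lemma pvCell_mem {maxc : Nat} {o : List Int} {tb : List Int}
    (hlen : o.length = maxc) (hmem : ∀ x ∈ o, x ∈ tb) {c : Nat} (hc : c < maxc) :
    pvCell o c ∈ tb := by
  have hco : c < o.length := by omega
  have : pvCell o c = o[c] := by
    simp [pvCell, PySem.List.pyGet?_natCast, List.getElem?_eq_getElem hco]
  rw [this]
  exact hmem _ (List.getElem_mem hco)

lemma pvKey_inj {tb : List Int} {maxc : Nat} {o o' : List Int}
    (hlo : o.length = maxc) (hlo' : o'.length = maxc)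
    (hmo : ∀ x ∈ o, x ∈ tb) (hmo' : ∀ x ∈ o', x ∈ tb)
    (h : pvKp tb maxc o = pvKp tb maxc o') : o = o' := by
  apply List.ext_getElem (by omega)
  intro i hi hi'
  have hic : i < maxc := by omega
  have hcomp : pvRank tb (pvCell o i) = pvRank tb (pvCell o' i) := by
    have := congrArg (fun l => l[i]?) h
    simpa [pvKp, List.getElem?_map, List.getElem?_range hic] using this
  have hceq : pvCell o i = pvCell o' i :=
    pvRank_inj (pvCell_mem hlo hmo hic) (pvCell_mem hlo' hmo' hic) hcomp
  have e1 : pvCell o i = o[i] := by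
    simp [pvCell, PySem.List.pyGet?_natCast, List.getElem?_eq_getElem hi]
  have e2 : pvCell o' i = o'[i] := by
    simp [pvCell, PySem.List.pyGet?_natCast, List.getElem?_eq_getElem hi']
  rw [← e1, ← e2, hceq]

-- main loop invariant: the loop's survivors are exactly (copies of) the lex-min row m
lemma pvLoop_inv (tb : List Int) (maxc : Nat) (R : List (List Int)) (m : List Int)
    (hlen : ∀ o ∈ R, o.length = maxc) (hmem : ∀ o ∈ R, ∀ x ∈ o, x ∈ tb)
    (hm : PySem.List.min? R (pvKey tb maxc) = some m) :
    ∀ k c objs, maxc - c ≤ k → c ≤ maxc → (∀ o ∈ objs, o ∈ R) → m ∈ objs →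
      (∀ o ∈ objs, pvKp tb c o = pvKp tb c m) →
      (m ∈ pvLoop tb maxc c objs ∧ ∀ o ∈ pvLoop tb maxc c objs, o = m) := by
  have hmR : m ∈ R := PySem.List.min?_mem hm
  rw [pvMin?_ord] at hm
  have hminKey : ∀ y ∈ R, pvKey tb maxc m ≤ pvKey tb maxc y := PySem.List.min?_isMin hm
  intro k
  induction k with
  | zero =>
    intro c objs hk hc hsub hmin hpre
    have hceq : c = maxc := by omega
    subst hceq
    rw [pvLoop]
    have : ¬ (objs.length > 1 ∧ c < c) := by omega
    rw [dif_neg this]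
    refine ⟨hmin, fun o ho => ?_⟩
    exact pvKey_inj (hlen o (hsub o ho)) (hlen m hmR) (hmem o (hsub o ho)) (hmem m hmR) (hpre o ho)
  | succ k ih =>
    intro c objs hk hc hsub hmin hpre
    rw [pvLoop]
    by_cases hcond : objs.length > 1 ∧ c < maxc
    · rw [dif_pos hcond]
      obtain ⟨-, hclt⟩ := hcond
      -- analyse the step
      have hne : objs ≠ [] := List.ne_nil_of_mem hmin
      obtain ⟨mi, hmi⟩ : ∃ mi, PySem.List.min? (objs.map (fun o => pvRank tb (pvCell o c))) (fun r => r) = some mi := by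
        cases hmi : PySem.List.min? (objs.map (fun o => pvRank tb (pvCell o c))) (fun r => r) with
        | none =>
          exact absurd (List.map_eq_nil_iff.mp ((PySem.List.min?_eq_none_iff _ _).mp hmi)) hne
        | some mi => exact ⟨mi, rfl⟩
      obtain ⟨o0, ho0, hfo0⟩ := List.mem_map.mp (PySem.List.min?_mem hmi)
      have hmile : ∀ o ∈ objs, mi ≤ pvRank tb (pvCell o c) := by
        intro o ho
        exact PySem.List.min?_isMin hmi _ (List.mem_map_of_mem ho)
      -- mi equals m's rank in this column
      have hmiEq : pvRank tb (pvCell m c) = mi := by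
        rcases Nat.lt_or_ge mi (pvRank tb (pvCell m c)) with hlt | hge
        · exfalso
          obtain ⟨r0, hr0⟩ := pvKp_decomp tb o0 hclt
          obtain ⟨rm, hrm⟩ := pvKp_decomp tb m hclt
          have hlex : pvKp tb maxc o0 < pvKp tb maxc m := by
            rw [hr0, hrm, hpre o0 ho0]
            exact pvLex_append _ _ _ (by omega)
          have hle := hminKey o0 (hsub o0 ho0)
          rw [pvKey_eq_kp, pvKey_eq_kp] at hle
          exact absurd hlex (not_lt.mpr hle)
        · have := hmile m hmin
          omega
      -- the kept value is m's cell
      have hcellmem : pvCell m c ∈ tb := pvCell_mem (hlen m hmR) (hmem m hmR) hclt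
      obtain ⟨j, hj⟩ : ∃ j, PySem.List.index? tb (pvCell m c) = some j := by
        cases hj : PySem.List.index? tb (pvCell m c) with
        | none => exact absurd hcellmem ((PySem.List.index?_eq_none_iff _ _).mp hj)
        | some j => exact ⟨j, rfl⟩
      have hjmi : j = mi := by
        have : pvRank tb (pvCell m c) = j := by simp only [pvRank, hj, Option.getD_some]
        omega
      rw [hjmi] at hj
      obtain ⟨hjlt, hjget, -⟩ := PySem.List.getElem_of_index?_eq_some hj
      have hv : (PySem.List.pyGet? tb (mi : Int)).getD 0 = pvCell m c := by
        rw [PySem.List.pyGet?_natCast, List.getElem?_eq_getElem hjlt, Option.getD_some, hjget]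
      -- invariants for the filtered, deduplicated survivors
      have hsetmem : ∀ o, o ∈ pvStep tb c objs ↔ (o ∈ objs ∧ pvCell o c = pvCell m c) := by
        intro o
        simp only [pvStep, hmi, Option.getD_some, PySem.Set.mem_ofList, List.mem_filter, hv,
          beq_iff_eq]
      refine ih (c + 1) (pvStep tb c objs) (by omega) (by omega) ?_ ?_ ?_
      · intro o ho
        exact hsub o ((hsetmem o).mp ho).1
      · exact (hsetmem m).mpr ⟨hmin, rfl⟩
      · intro o ho
        obtain ⟨hoin, hocell⟩ := (hsetmem o).mp ho
        rw [pvKp_succ, pvKp_succ, hpre o hoin, hocell]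
    · rw [dif_neg hcond]
      by_cases hcm : c < maxc
      · -- early exit: a single survivor, which must be m
        have hlen1 : objs.length ≤ 1 := by
          rcases Nat.lt_or_ge 1 objs.length with h1 | h1
          · exact absurd ⟨h1, hcm⟩ hcond
          · exact h1
        match objs, hmin with
        | [a], hmin =>
          have : m = a := by simpa using hmin
          subst this
          exact ⟨by simp, by simp⟩
      · have hceq : c = maxc := by omega
        subst hceq
        refine ⟨hmin, fun o ho => ?_⟩
        exact pvKey_inj (hlen o (hsub o ho)) (hlen m hmR) (hmem o (hsub o ho)) (hmem m hmR) (hpre o ho)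

-- ===== VERDICT (by name: the statement is the Claim_ definition above) =====
theorem break_ties_complex___py_spec : Claim_equal_break_ties_complex___py := by
  intro tied_objects tie_breaker _hdom hpre
  obtain ⟨hne, hdisj⟩ := hpre
  unfold Spec_break_ties_complex___py
  by_cases h1 : tied_objects.length = 1
  · -- a single candidate: A's loop never runs, B returns it directly
    obtain ⟨o, rfl⟩ : ∃ o, tied_objects = [o] := by
      cases tied_objects with
      | nil => simp at h1
      | cons h t =>
        cases t with
        | nil => exact ⟨h, rfl⟩
        | cons h' t' => simp at h1
    rw [break_ties_complex___py, break_ties_complex___py_alt, pvLoop]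
    norm_num
  have ⟨hlen, hmem⟩ : (∀ o ∈ tied_objects, o.length = (tied_objects.headD []).length) ∧
      (∀ o ∈ tied_objects, ∀ x ∈ o, x ∈ tie_breaker) := by
    rcases hdisj with h | h
    · exact absurd h h1
    · exact h
  cases tied_objects with
  | nil => exact absurd rfl hne
  | cons h0 t =>
    set R : List (List Int) := h0 :: t with hR
    have hget0 : (PySem.List.pyGet? R 0).getD [] = h0 := by
      simp [hR]
    have hlen' : ∀ o ∈ R, o.length = h0.length := by
      intro o ho
      simpa using hlen o ho
    obtain ⟨m, hm⟩ : ∃ m, PySem.List.min? R (pvKey tie_breaker h0.length) = some m := by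
      cases hmc : PySem.List.min? R (pvKey tie_breaker h0.length) with
      | none => exact absurd ((PySem.List.min?_eq_none_iff _ _).mp hmc) (by simp [hR])
      | some m => exact ⟨m, rfl⟩
    have hinv := pvLoop_inv tie_breaker h0.length R m hlen' hmem hm h0.length 0 R
      (by omega) (by omega) (fun o ho => ho) (PySem.List.min?_mem hm)
      (by intro o _; simp [pvKp])
    obtain ⟨hmL, hallL⟩ := hinv
    have hB : break_ties_complex___py_alt R tie_breaker = m := by
      simp only [break_ties_complex___py_alt, hget0, hm, Option.getD_some, if_neg h1]
    have hA : break_ties_complex___py R tie_breaker = m := by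
      simp only [break_ties_complex___py, hget0]
      cases hL : pvLoop tie_breaker h0.length 0 R with
      | nil => rw [hL] at hmL; exact absurd hmL (List.not_mem_nil)
      | cons a l =>
        rw [hL] at hallL
        have : a = m := hallL a (by simp)
        simp [this]
    rw [hA, hB]
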